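-- pv_equiv track=rewrite | github.com/immanuelk1m/video-subtitle-remover | backend/main.py | split_range_by_scene
-- ===== SOURCE A (Python) =====
-- def split_range_by_scene(intervals, points):
--     # 이산 값 목록이 정렬되었는지 확인
--     points.sort()
--     # 결과 구간을 저장하는 목록
--     result_intervals = []
--     # 구간 순회
--     for start, end in intervals:
--         # 현재 구간 내의 점
--         current_points = [p for p in points if start <= p <= end]
--
--         # 현재 구간 내의 이산 점 순회
--         for p in current_points:
--             # 현재 이산 점이 구간의 시작점이 아니면, 구간 시작부터 이산 점 이전 숫자까지의 구간 추가
--             if start < p: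
--                 result_intervals.append((start, p - 1))
--             # 구간 시작을 현재 이산 점으로 업데이트
--             start = p
--         # 마지막 이산 점 또는 구간 시작부터 구간 끝까지의 구간 추가
--         result_intervals.append((start, end))
--     # 결과 출력
--     return result_intervals
-- ===== SOURCE B (Python) =====
-- def _bisect_left(a, x):
--     # standard binary search for the leftmost insertion point (a is sorted)
--     lo, hi = 0, len(a)
--     while lo < hi:
--         mid = (lo + hi) // 2
--         if a[mid] < x:
--             lo = mid + 1
--         else:
--             hi = mid
--     return lo
--
--
-- def split_range_by_scene(intervals, points):
--     # Like A, sorts `points` in place (same observable side effect).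
--     points.sort()
--     n = len(points)
--     out = []
--     for start, end in intervals:
--         i = _bisect_left(points, start)   # first point >= start
--         while i < n and points[i] <= end:
--             p = points[i]
--             if start < p:
--                 out.append((start, p - 1))
--             start = p
--             i += 1
--         out.append((start, end))
--     return out
-- ===== Notes on version B (the rewrite author's own statement) =====
-- stated objective: faster
-- what changed: Per interval, B locates the in-range points with one hand-written binary search (bisect_left) on the sorted points and walks only them, instead of A's full filtering scan of all points and an intermediate list per interval.
import Mathlib
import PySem

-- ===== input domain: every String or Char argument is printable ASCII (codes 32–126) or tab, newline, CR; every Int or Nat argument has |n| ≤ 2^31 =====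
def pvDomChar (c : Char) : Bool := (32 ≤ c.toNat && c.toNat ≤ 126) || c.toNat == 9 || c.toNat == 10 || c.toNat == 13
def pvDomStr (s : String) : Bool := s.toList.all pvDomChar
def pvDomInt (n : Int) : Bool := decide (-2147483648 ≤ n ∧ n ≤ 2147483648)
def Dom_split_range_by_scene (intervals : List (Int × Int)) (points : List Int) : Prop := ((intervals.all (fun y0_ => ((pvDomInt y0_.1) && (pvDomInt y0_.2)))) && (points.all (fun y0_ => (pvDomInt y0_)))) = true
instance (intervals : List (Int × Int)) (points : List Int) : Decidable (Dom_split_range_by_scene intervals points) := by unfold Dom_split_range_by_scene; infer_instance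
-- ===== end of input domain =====

-- B replaces A's per-interval full scan of `points` with one binary search (bisect_left) plus a
-- walk over just the in-range points. Both Pythons sort `points` in place (the same observable
-- mutation); the equivalence proved here is about the return value.

-- ===== PORT A =====
-- A: sort points; per interval, filter the points lying inside it, then walk them emitting segments.
def split_range_by_scene (intervals : List (Int × Int)) (points : List Int) : List (Int × Int) :=
  let pts := PySem.List.sorted points (fun x => x)
  intervals.foldl (fun acc se =>
    let cur := pts.filter (fun p => decide (se.1 ≤ p ∧ p ≤ se.2))
    let r := cur.foldl (fun (q : Int × List (Int × Int)) p =>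
      (p, if q.1 < p then q.2 ++ [(q.1, p - 1)] else q.2)) (se.1, acc)
    r.2 ++ [(r.1, se.2)]) []

-- ===== PORT B =====
-- Source B's `while i < n and points[i] <= end` loop: walks indices i upward from the bisect point
def emitIdx (pts : List Int) (e : Int) (i : Nat) (start : Int) (acc : List (Int × Int)) :
    Int × List (Int × Int) :=
  if _h : i < pts.length ∧ pts.getD i 0 ≤ e then
    let p := pts.getD i 0
    emitIdx pts e (i + 1) p (if start < p then acc ++ [(start, p - 1)] else acc)
  else (start, acc)
termination_by pts.length - i
decreasing_by omega

-- Source B's hand-written `_bisect_left` is exactly the standard bisect_left loop = PySem.List.bisectLeft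
def split_range_by_scene_alt (intervals : List (Int × Int)) (points : List Int) : List (Int × Int) :=
  let pts := PySem.List.sorted points (fun x => x)
  intervals.foldl (fun acc se =>
    let r := emitIdx pts se.2 (PySem.List.bisectLeft pts se.1) se.1 acc
    r.2 ++ [(r.1, se.2)]) []

-- ===== PRECONDITION & SPEC =====
def Spec_split_range_by_scene (intervals : List (Int × Int)) (points : List Int) (out : List (Int × Int)) : Prop := out = split_range_by_scene_alt intervals points
instance (intervals : List (Int × Int)) (points : List Int) (out : List (Int × Int)) : Decidable (Spec_split_range_by_scene intervals points out) := by unfold Spec_split_range_by_scene; infer_instance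

-- ===== CLAIM (what is proved, stated in full; the proofs are below) =====
def Claim_equal_split_range_by_scene : Prop := ∀ (intervals : List (Int × Int)) (points : List Int), Dom_split_range_by_scene intervals points → Spec_split_range_by_scene intervals points (split_range_by_scene intervals points)

-- ===== LEMMAS AND PROOFS =====

-- B's index walk is A's inner fold over the ≤e-prefix of the suffix of pts starting at i
theorem emitIdx_eq_foldl (pts : List Int) (e : Int) :
    ∀ n i start acc, pts.length - i ≤ n → emitIdx pts e i start acc =
      ((pts.drop i).takeWhile (fun p => decide (p ≤ e))).foldl
        (fun (q : Int × List (Int × Int)) p =>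
          (p, if q.1 < p then q.2 ++ [(q.1, p - 1)] else q.2)) (start, acc) := by
  intro n
  induction n with
  | zero =>
    intro i start acc hn
    rw [emitIdx]
    have hlen : ¬ i < pts.length := by omega
    simp only [hlen, false_and, dite_false]
    rw [List.drop_eq_nil_of_le (by omega)]
    simp
  | succ n ih =>
    intro i start acc hn
    rw [emitIdx]
    by_cases hlen : i < pts.length
    · have hdrop : pts.drop i = pts[i] :: pts.drop (i + 1) :=
        List.drop_eq_getElem_cons hlen
      have hgd : pts.getD i 0 = pts[i] := List.getD_eq_getElem pts 0 hlen
      by_cases hle : pts.getD i 0 ≤ e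
      · simp only [hlen, hle, and_self, dite_true]
        rw [ih (i + 1) _ _ (by omega), hdrop, List.takeWhile_cons]
        have hd : decide (pts[i] ≤ e) = true := by rw [← hgd]; exact decide_eq_true hle
        rw [hd]
        simp only [if_true, List.foldl_cons, hgd]
      · simp only [hlen, hle, and_false, dite_false]
        rw [hdrop, List.takeWhile_cons]
        have hd : decide (pts[i] ≤ e) = false := by rw [← hgd]; simpa using hle
        rw [hd]
        simp
    · simp only [hlen, false_and, dite_false]
      rw [List.drop_eq_nil_of_le (by omega)]
      simp

-- on a nondecreasing list, filtering (· ≤ e) is taking the ≤e prefix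
theorem filter_le_eq_takeWhile (e : Int) :
    ∀ (l : List Int), l.Pairwise (· ≤ ·) →
      l.filter (fun p => decide (p ≤ e)) = l.takeWhile (fun p => decide (p ≤ e)) := by
  intro l hl
  induction l with
  | nil => rfl
  | cons a t ih =>
    rw [List.pairwise_cons] at hl
    by_cases h : a ≤ e
    · simp only [List.filter_cons, List.takeWhile_cons, h, decide_true, if_true]
      rw [ih hl.2]
    · simp only [List.filter_cons, List.takeWhile_cons, h, decide_false]
      simp only [Bool.false_eq_true, if_false]
      rw [List.filter_eq_nil_iff.mpr]
      intro x hx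
      have := hl.1 x hx
      simp only [decide_eq_true_eq]
      omega

-- A's per-interval filtered list = the ≤e prefix of pts dropped at bisectLeft pts s (pts sorted)
theorem filter_eq_takeWhile_drop (pts : List Int) (s e : Int)
    (hs : pts.Pairwise (· ≤ ·)) :
    pts.filter (fun p => decide (s ≤ p ∧ p ≤ e)) =
      ((pts.drop (PySem.List.bisectLeft pts s)).takeWhile (fun p => decide (p ≤ e))) := by
  obtain ⟨hk, hlt, hge⟩ := PySem.List.bisectLeft_spec pts s hs
  set k := PySem.List.bisectLeft pts s with hkdef
  have htake : (pts.take k).filter (fun p => decide (s ≤ p ∧ p ≤ e)) = [] := by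
    rw [List.filter_eq_nil_iff]
    intro x hx
    obtain ⟨j, hj, hxj⟩ := List.mem_iff_getElem.mp hx
    have hjk : j < k := by simp [List.length_take] at hj; omega
    have hj' : j < pts.length := by simp [List.length_take] at hj; omega
    have hxv : x = pts[j] := by rw [← hxj, List.getElem_take]
    have : pts[j] < s := hlt j hj' hjk
    simp only [decide_eq_true_eq, not_and]
    intro hsx
    omega
  have hdropf : (pts.drop k).filter (fun p => decide (s ≤ p ∧ p ≤ e)) =
      (pts.drop k).filter (fun p => decide (p ≤ e)) := by
    apply List.filter_congr
    intro x hx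
    obtain ⟨j, hj, hxj⟩ := List.mem_iff_getElem.mp hx
    have hj' : k + j < pts.length := by simp [List.length_drop] at hj; omega
    have hxv : x = pts[k + j] := by rw [← hxj, List.getElem_drop]
    have hsx : s ≤ pts[k + j] := hge (k + j) hj' (by omega)
    simp [hxv, hsx]
  have hsorted' : (pts.drop k).Pairwise (· ≤ ·) :=
    hs.sublist (List.drop_sublist k pts)
  calc pts.filter (fun p => decide (s ≤ p ∧ p ≤ e))
      = (pts.take k ++ pts.drop k).filter (fun p => decide (s ≤ p ∧ p ≤ e)) := by
        rw [List.take_append_drop]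
    _ = (pts.drop k).filter (fun p => decide (s ≤ p ∧ p ≤ e)) := by
        rw [List.filter_append, htake, List.nil_append]
    _ = (pts.drop k).filter (fun p => decide (p ≤ e)) := hdropf
    _ = (pts.drop k).takeWhile (fun p => decide (p ≤ e)) :=
        filter_le_eq_takeWhile e _ hsorted'

-- the two interval folds agree step by step (for any accumulator), pts sorted
theorem fold_eq (pts : List Int) (hs : pts.Pairwise (· ≤ ·)) :
    ∀ (L : List (Int × Int)) (acc : List (Int × Int)),
      L.foldl (fun acc se =>
        let cur := pts.filter (fun p => decide (se.1 ≤ p ∧ p ≤ se.2))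
        let r := cur.foldl (fun (q : Int × List (Int × Int)) p =>
          (p, if q.1 < p then q.2 ++ [(q.1, p - 1)] else q.2)) (se.1, acc)
        r.2 ++ [(r.1, se.2)]) acc =
      L.foldl (fun acc se =>
        let r := emitIdx pts se.2 (PySem.List.bisectLeft pts se.1) se.1 acc
        r.2 ++ [(r.1, se.2)]) acc := by
  intro L
  induction L with
  | nil => intro acc; rfl
  | cons se rest ih =>
    intro acc
    simp only [List.foldl_cons]
    rw [emitIdx_eq_foldl pts se.2 pts.length (PySem.List.bisectLeft pts se.1) se.1 acc (by omega),
        ← filter_eq_takeWhile_drop pts se.1 se.2 hs]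
    exact ih _

-- ===== VERDICT (by name: the statement is the Claim_ definition above) =====
theorem split_range_by_scene_spec : Claim_equal_split_range_by_scene := by
  intro intervals points _
  unfold Spec_split_range_by_scene split_range_by_scene split_range_by_scene_alt
  exact fold_eq _ (PySem.List.sorted_pairwise points (fun x => x)) intervals []
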